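-- pv_equiv track=rewrite | github.com/djeada/Nauka-Programowania | src/python/12_napisy_anagramy_i_palindromy/zad04.py | wyczysc_slowo
-- ===== SOURCE A (Python) =====
-- def wyczysc_slowo(slowo):
--     """
--     Usuwa interpunkcję z brzegów słowa.
--
--     Złożoność czasowa: O(n), gdzie n to długość słowa
--     Złożoność pamięciowa: O(n) dla wyniku
--     """
--     # Usunięcie niealfanumerycznych znaków z początku i końca
--     poczatek = 0
--     koniec = len(slowo) - 1
--
--     while poczatek <= koniec and not slowo[poczatek].isalnum():
--         poczatek += 1
--
--     while koniec >= poczatek and not slowo[koniec].isalnum():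
--         koniec -= 1
--
--     return slowo[poczatek:koniec + 1]
-- ===== SOURCE B (Python) =====
-- def wyczysc_slowo(slowo):
--     """
--     Usuwa interpunkcję z brzegów słowa.
--
--     Jedna pelna petla zbierajaca indeksy znakow alfanumerycznych,
--     potem wyciecie od pierwszego do ostatniego.
--     """
--     idx = [i for i, c in enumerate(slowo) if c.isalnum()]
--     if not idx:
--         return ""
--     return slowo[idx[0]:idx[-1] + 1]
-- ===== Notes on version B (the rewrite author's own statement) =====
-- stated objective: alternative
-- what changed: Replaces A's two inward edge scans with mutable pointers by one forward enumerate pass collecting all alphanumeric indices, then a single slice from the first to the last collected index.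
import Mathlib
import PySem

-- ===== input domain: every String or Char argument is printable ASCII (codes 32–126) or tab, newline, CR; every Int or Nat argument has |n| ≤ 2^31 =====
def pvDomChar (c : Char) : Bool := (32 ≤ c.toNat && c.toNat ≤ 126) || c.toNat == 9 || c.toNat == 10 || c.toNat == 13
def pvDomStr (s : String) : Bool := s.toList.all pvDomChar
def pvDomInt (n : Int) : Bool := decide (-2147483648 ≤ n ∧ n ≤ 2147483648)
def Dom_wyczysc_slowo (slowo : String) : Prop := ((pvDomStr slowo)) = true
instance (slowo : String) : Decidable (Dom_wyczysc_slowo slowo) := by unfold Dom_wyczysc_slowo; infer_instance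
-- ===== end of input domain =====

-- B replaces A's two inward edge scans by one full enumerate pass collecting all
-- alphanumeric indices, then a single slice; same O(n) cost, no speed claim.

-- ===== PORT A =====
-- first while loop: advance poczatek while it points at a non-alphanumeric char
-- (pyGetD's default is never used: the loop guard keeps the index in range)
def wsLoop1 (cs : List Char) (k p : Int) : Int :=
  if h : p ≤ k ∧ ¬ (PySem.Chars.isalnum (PySem.List.pyGetD cs p ' ') = true) then
    wsLoop1 cs k (p + 1)
  else p
termination_by (k + 1 - p).toNat
decreasing_by
  exact (Int.toNat_lt_toNat (sub_pos.mpr (Int.lt_add_one_iff.mpr h.1))).mpr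
    (sub_lt_sub_left (lt_add_one p) (k + 1))

-- second while loop: retreat koniec while it points at a non-alphanumeric char
def wsLoop2 (cs : List Char) (p k : Int) : Int :=
  if h : p ≤ k ∧ ¬ (PySem.Chars.isalnum (PySem.List.pyGetD cs k ' ') = true) then
    wsLoop2 cs p (k - 1)
  else k
termination_by (k + 1 - p).toNat
decreasing_by
  rw [show k - 1 + 1 - p = k - p from by ring]
  exact (Int.toNat_lt_toNat (sub_pos.mpr (Int.lt_add_one_iff.mpr h.1))).mpr
    (sub_lt_sub_right (lt_add_one k) p)

def wyczysc_slowo (slowo : String) : String :=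
  let cs := slowo.toList
  let poczatek := wsLoop1 cs ((cs.length : Int) - 1) 0
  let koniec := wsLoop2 cs poczatek ((cs.length : Int) - 1)
  String.ofList (PySem.List.slice cs (some poczatek) (some (koniec + 1)))

-- ===== PORT B =====
def wyczysc_slowo_alt (slowo : String) : String :=
  let cs := slowo.toList
  let idx := ((PySem.List.enumerate cs 0).filter (fun p => PySem.Chars.isalnum p.2)).map (fun p => p.1)
  if idx = [] then ""
  else String.ofList (PySem.List.slice cs (some (PySem.List.pyGetD idx 0 0))
        (some (PySem.List.pyGetD idx (-1) 0 + 1)))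

-- ===== PRECONDITION & SPEC =====
def Spec_wyczysc_slowo (slowo : String) (out : String) : Prop := out = wyczysc_slowo_alt slowo
instance (slowo : String) (out : String) : Decidable (Spec_wyczysc_slowo slowo out) := by unfold Spec_wyczysc_slowo; infer_instance

-- ===== CLAIM (what is proved, stated in full; the proofs are below) =====
def Claim_equal_wyczysc_slowo : Prop := ∀ (slowo : String), Dom_wyczysc_slowo slowo → Spec_wyczysc_slowo slowo (wyczysc_slowo slowo)

-- ===== LEMMAS AND PROOFS =====

-- abbreviation used only in the proofs
def wsF (c : Char) : Bool := PySem.Chars.isalnum c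

-- B's index list, written structurally
def wsIdx (cs : List Char) (s : Int) : List Int :=
  ((PySem.List.enumerate cs s).filter (fun p => PySem.Chars.isalnum p.2)).map (fun p => p.1)

theorem wsIdx_nil (s : Int) : wsIdx [] s = [] := by
  simp [wsIdx, PySem.List.enumerate_nil]

theorem wsIdx_cons (c : Char) (cs : List Char) (s : Int) :
    wsIdx (c :: cs) s = if wsF c then s :: wsIdx cs (s + 1) else wsIdx cs (s + 1) := by
  simp only [wsIdx, wsF, PySem.List.enumerate_cons, List.filter_cons]
  by_cases hc : PySem.Chars.isalnum c = true <;> simp [hc]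

theorem wsIdx_append_singleton (cs : List Char) (c : Char) (s : Int) :
    wsIdx (cs ++ [c]) s = wsIdx cs s ++ (if wsF c then [s + cs.length] else []) := by
  induction cs generalizing s with
  | nil => simp [wsIdx_nil, wsIdx_cons]
  | cons x xs ih =>
    rw [List.cons_append, wsIdx_cons, wsIdx_cons, ih]
    by_cases hx : wsF x <;> by_cases hc : wsF c <;>
      simp [hx, hc] <;> ring_nf

theorem wsLoop1_eq (cs : List Char) (p : Nat) (hp : p ≤ cs.length) :
    wsLoop1 cs ((cs.length : Int) - 1) p = p + (cs.drop p).findIdx wsF := by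
  generalize hfuel : cs.length - p = fuel
  induction fuel generalizing p with
  | zero =>
    have hpl : p = cs.length := by omega
    rw [wsLoop1, dif_neg]
    · subst hpl; simp
    · rintro ⟨h1, -⟩; omega
  | succ m ih =>
    have hplt : p < cs.length := by omega
    have hget : PySem.List.pyGetD cs (p : Int) ' ' = cs[p] := by
      rw [PySem.List.pyGetD_natCast, List.getD_eq_getElem?_getD, List.getElem?_eq_getElem hplt]
      rfl
    rw [wsLoop1]
    by_cases hF : wsF cs[p]
    · rw [dif_neg]
      · rw [List.drop_eq_getElem_cons hplt, List.findIdx_cons, hF]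
        simp
      · rintro ⟨-, h2⟩
        exact h2 (by simpa [wsF, hget] using hF)
    · rw [dif_pos ⟨by omega, by simp [hget]; simpa [wsF] using hF⟩]
      have : (p : Int) + 1 = ((p + 1 : Nat) : Int) := by push_cast; ring
      rw [this, ih (p + 1) (by omega) (by omega)]
      rw [List.drop_eq_getElem_cons hplt, List.findIdx_cons]
      simp only [wsF] at hF
      simp only [wsF, hF, cond_false]
      push_cast; ring

theorem wsLoop2_eq (cs : List Char) (p : Int) (k : Nat) (hk : k ≤ cs.length)
    (hx : ∃ (j : Nat) (hj : j < cs.length), j < k ∧ p ≤ (j : Int) ∧ wsF cs[j]) :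
    wsLoop2 cs p ((k : Int) - 1) = (k : Int) - 1 - (cs.take k).reverse.findIdx wsF := by
  induction k with
  | zero => obtain ⟨j, hj, hjk, -, -⟩ := hx; omega
  | succ m ih =>
    have hm : m < cs.length := by omega
    have hidx : ((m + 1 : Nat) : Int) - 1 = (m : Int) := by push_cast; ring
    have hget : PySem.List.pyGetD cs ((m + 1 : Nat) - 1 : Int) ' ' = cs[m] := by
      rw [hidx, PySem.List.pyGetD_natCast, List.getD_eq_getElem?_getD,
        List.getElem?_eq_getElem hm]
      rfl
    have htake : (cs.take (m + 1)).reverse = cs[m] :: (cs.take m).reverse := by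
      rw [List.take_add_one, List.getElem?_eq_getElem hm]
      simp
    rw [wsLoop2]
    by_cases hF : wsF cs[m]
    · rw [dif_neg, htake, List.findIdx_cons, hF]
      · simp
      · rintro ⟨-, h2⟩
        exact h2 (by rw [hget]; simpa [wsF] using hF)
    · obtain ⟨j, hj, hjk, hpj, hFj⟩ := hx
      have hjm : j < m := by
        rcases Nat.lt_succ_iff_lt_or_eq.mp hjk with h | h
        · exact h
        · subst h; exact absurd hFj hF
      rw [dif_pos ⟨by push_cast at hpj ⊢; omega, by rw [hget]; simpa [wsF] using hF⟩]
      have harg : ((m + 1 : Nat) : Int) - 1 - 1 = ((m : Nat) : Int) - 1 := by push_cast; ring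
      rw [harg, ih (by omega) ⟨j, hj, hjm, hpj, hFj⟩, htake, List.findIdx_cons]
      simp only [wsF] at hF
      simp only [wsF, hF, cond_false]
      push_cast; ring

theorem wsIdx_empty_iff (cs : List Char) (s : Int) :
    wsIdx cs s = [] ↔ cs.any wsF = false := by
  induction cs generalizing s with
  | nil => simp [wsIdx_nil]
  | cons c cs ih =>
    rw [wsIdx_cons]
    by_cases hc : wsF c
    · have hc' : PySem.Chars.isalnum c = true := by simpa [wsF] using hc
      simp [hc, List.any_cons]
    · have hc' : PySem.Chars.isalnum c = false := by simpa [wsF] using hc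
      rw [if_neg hc, ih (s + 1)]
      simp [List.any_cons, hc', wsF]

theorem wsIdx_head (cs : List Char) (s : Int) (h : cs.any wsF = true) :
    (wsIdx cs s).head? = some (s + cs.findIdx wsF) := by
  induction cs generalizing s with
  | nil => simp at h
  | cons c cs ih =>
    rw [wsIdx_cons, List.findIdx_cons]
    by_cases hc : wsF c
    · simp [hc]
    · have h' : cs.any wsF = true := by simpa [hc] using h
      rw [if_neg hc, ih (s + 1) h']
      simp [hc]
      ring

theorem wsIdx_last (cs : List Char) (s : Int) (h : cs.any wsF = true) :
    (wsIdx cs s).getLast? = some (s + (cs.length : Int) - 1 - cs.reverse.findIdx wsF) := by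
  induction cs using List.reverseRecOn generalizing s with
  | nil => simp at h
  | append_singleton cs c ih =>
    rw [wsIdx_append_singleton, List.reverse_append, List.reverse_singleton,
      List.singleton_append, List.findIdx_cons]
    by_cases hc : wsF c
    · simp [hc]
      ring
    · have h' : cs.any wsF = true := by simpa [hc] using h
      rw [if_neg hc, List.append_nil, ih s h']
      simp [hc]
      ring

-- ===== VERDICT (by name: the statement is the Claim_ definition above) =====
theorem wyczysc_slowo_spec : Claim_equal_wyczysc_slowo := by
  intro slowo _
  unfold Spec_wyczysc_slowo wyczysc_slowo wyczysc_slowo_alt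
  simp only []
  set cs := slowo.toList with hcs
  have hidx : ((PySem.List.enumerate cs 0).filter (fun p => PySem.Chars.isalnum p.2)).map (fun p => p.1) = wsIdx cs 0 := rfl
  rw [hidx]
  have hp0 : wsLoop1 cs ((cs.length : Int) - 1) 0 = ((cs.findIdx wsF : Nat) : Int) := by
    have h := wsLoop1_eq cs 0 (by omega)
    simpa using h
  by_cases h : cs.any wsF = true
  · -- some alphanumeric character exists
    have hlt : cs.findIdx wsF < cs.length := List.findIdx_lt_length.mpr (List.any_eq_true.mp h)
    have hFf : wsF cs[cs.findIdx wsF] = true := List.findIdx_getElem (w := hlt)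
    have hk : wsLoop2 cs ((cs.findIdx wsF : Nat) : Int) ((cs.length : Int) - 1)
        = (cs.length : Int) - 1 - ((cs.reverse.findIdx wsF : Nat) : Int) := by
      have h2 := wsLoop2_eq cs ((cs.findIdx wsF : Nat) : Int) cs.length le_rfl
        ⟨cs.findIdx wsF, hlt, hlt, le_refl _, hFf⟩
      simpa using h2
    have hne : wsIdx cs 0 ≠ [] := by
      intro hnil
      rw [wsIdx_empty_iff] at hnil
      simp [hnil] at h
    rw [if_neg hne, hp0, hk]
    have hhead : PySem.List.pyGetD (wsIdx cs 0) 0 0 = ((cs.findIdx wsF : Nat) : Int) := by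
      rw [PySem.List.pyGetD_zero, List.getD_eq_getElem?_getD, ← List.head?_eq_getElem?,
        wsIdx_head cs 0 h]
      simp
    have hlast : PySem.List.pyGetD (wsIdx cs 0) (-1) 0
        = (cs.length : Int) - 1 - ((cs.reverse.findIdx wsF : Nat) : Int) := by
      rw [PySem.List.pyGetD_neg_one (wsIdx cs 0) 0 hne,
        (List.getLast_eq_iff_getLast?_eq_some hne).mpr (wsIdx_last cs 0 h)]
      ring
    rw [hhead, hlast]
  · -- no alphanumeric character: both sides give ""
    have hall : cs.any wsF = false := by simpa using h
    have hfull : cs.findIdx wsF = cs.length := List.findIdx_eq_length.mpr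
      (fun x hx => by simpa using List.any_eq_false.mp hall x hx)
    have hk : wsLoop2 cs ((cs.length : Nat) : Int) ((cs.length : Int) - 1) = (cs.length : Int) - 1 := by
      rw [wsLoop2, dif_neg]
      rintro ⟨h1, -⟩
      omega
    rw [if_pos ((wsIdx_empty_iff cs 0).mpr hall), hp0, hfull, hk]
    have : (cs.length : Int) - 1 + 1 = ((cs.length : Nat) : Int) := by ring
    rw [this, PySem.List.slice_natCast]
    simp
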